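-- pv_equiv track=rewrite | github.com/miaoli-psy/numerosity_exps | analysis/radial_displays.py | get_point_num_in_range
-- ===== SOURCE A (Python) =====
-- def get_point_num_in_range(count_list:list, curr_range:list) -> int:
--     # count_list: disc num for given angle: [[angle, point_count_number], etc]
--     # curr_range: angle range [start: end)
--     # point_num: how many disc in curr_range
--     point_num = 0
--     start, end = curr_range[0], curr_range[1]
--     if start < end:
--         for angle_num in count_list[start:end]:
--             point_num += angle_num[1]
--     else:
--         for angle_num in count_list[start:]:
--             point_num += angle_num[1]
--         for angle_num in count_list[0:end]:
--             point_num += angle_num[1]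
--     return point_num
-- ===== SOURCE B (Python) =====
-- def get_point_num_in_range(count_list: list, curr_range: list) -> int:
--     # Prefix-sum decomposition: build cumulative counts once, then each arc
--     # sum is a difference of two prefix sums at the slice's clamped bounds.
--     start, end = curr_range[0], curr_range[1]
--     n = len(count_list)
--     pref = [0]
--     for a in count_list:
--         pref.append(pref[-1] + a[1])
--
--     def seg(a, b):
--         lo, hi, _ = slice(a, b).indices(n)
--         return pref[hi] - pref[lo] if lo < hi else 0
--
--     if start < end:
--         return seg(start, end)
--     return seg(start, n) + seg(0, end)
-- ===== Notes on version B (the rewrite author's own statement) =====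
-- stated objective: alternative
-- what changed: B builds a prefix-sum array of the counts in one pass and computes each (possibly wrapping) arc as a difference of two prefix sums at the slice's clamped indices, instead of A's accumulator loops over materialised slices.
-- outside the precondition, e.g. on get_point_num_in_range([[1, 2], [9]], [0, 1]): A returns 2, B raises IndexError
import Mathlib
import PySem

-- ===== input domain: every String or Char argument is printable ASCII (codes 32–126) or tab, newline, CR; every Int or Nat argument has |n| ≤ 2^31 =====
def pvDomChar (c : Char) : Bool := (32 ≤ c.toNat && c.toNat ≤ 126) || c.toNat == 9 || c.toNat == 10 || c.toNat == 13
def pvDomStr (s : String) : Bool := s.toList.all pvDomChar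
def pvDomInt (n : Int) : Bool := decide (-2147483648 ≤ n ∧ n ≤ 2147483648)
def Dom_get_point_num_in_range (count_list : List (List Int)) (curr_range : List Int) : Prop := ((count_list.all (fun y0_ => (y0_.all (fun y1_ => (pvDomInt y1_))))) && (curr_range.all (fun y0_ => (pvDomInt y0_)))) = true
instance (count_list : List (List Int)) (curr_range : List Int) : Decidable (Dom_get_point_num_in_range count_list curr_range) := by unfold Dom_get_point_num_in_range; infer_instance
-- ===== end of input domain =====

-- B builds a prefix-sum array once and reads each arc as a difference of two prefix sums,
-- instead of A's accumulator loops over materialised slices (objective: alternative, same O(n)).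

-- ===== PORT A =====
def get_point_num_in_range (count_list : List (List Int)) (curr_range : List Int) : Int :=
  match PySem.List.pyGet? curr_range 0, PySem.List.pyGet? curr_range 1 with
  | some s, some e =>
    if s < e then
      (PySem.List.slice count_list (some s) (some e)).foldl
        (fun point_num angle_num => point_num + PySem.List.pyGetD angle_num 1 0) 0
    else
      let p1 := (PySem.List.slice count_list (some s) none).foldl
        (fun point_num angle_num => point_num + PySem.List.pyGetD angle_num 1 0) 0
      (PySem.List.slice count_list (some 0) (some e)).foldl
        (fun point_num angle_num => point_num + PySem.List.pyGetD angle_num 1 0) p1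
  | _, _ => 0  -- Python raises IndexError (curr_range too short); excluded by Pre_

-- ===== PORT B =====
-- seg(a, b): lo, hi, _ = slice(a, b).indices(n); pref[hi] - pref[lo] if lo < hi else 0
def pvSeg (pref : List Int) (n : Nat) (a b : Int) : Int :=
  let lo := PySem.List.clampIdx n a
  let hi := PySem.List.clampIdx n b
  if lo < hi then pref.getD hi 0 - pref.getD lo 0 else 0

def get_point_num_in_range_alt (count_list : List (List Int)) (curr_range : List Int) : Int :=
  match PySem.List.pyGet? curr_range 0 with
  | none => 0  -- Python raises IndexError (curr_range too short); excluded by Pre_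
  | some s =>
    match PySem.List.pyGet? curr_range 1 with
    | none => 0  -- Python raises IndexError; excluded by Pre_
    | some e =>
      let n := count_list.length
      -- pref = [0]; for a in count_list: pref.append(pref[-1] + a[1])
      let pref := count_list.foldl
        (fun pref a => pref ++ [PySem.List.pyGetD pref (-1) 0 + PySem.List.pyGetD a 1 0]) [0]
      if s < e then pvSeg pref n s e
      else pvSeg pref n s (n : Int) + pvSeg pref n 0 e

-- ===== PRECONDITION & SPEC =====
-- Pre_ excludes inputs where curr_range has fewer than two entries (both programs raise
-- IndexError) and inputs where some row of count_list has fewer than two entries: A returns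
-- whenever every row it slices over is long enough, but B's prefix-sum pass reads row[1] of
-- EVERY row and raises IndexError on such inputs (see cites).
def Pre_get_point_num_in_range (count_list : List (List Int)) (curr_range : List Int) : Prop :=
  2 ≤ curr_range.length ∧ ∀ a ∈ count_list, 2 ≤ a.length
instance (count_list : List (List Int)) (curr_range : List Int) : Decidable (Pre_get_point_num_in_range count_list curr_range) := by unfold Pre_get_point_num_in_range; infer_instance

def pvWitness_get_point_num_in_range : List (List Int) × List Int := ([[0, 3], [1, 5]], [0, 2])

def Spec_get_point_num_in_range (count_list : List (List Int)) (curr_range : List Int) (out : Int) : Prop := out = get_point_num_in_range_alt count_list curr_range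
instance (count_list : List (List Int)) (curr_range : List Int) (out : Int) : Decidable (Spec_get_point_num_in_range count_list curr_range out) := by unfold Spec_get_point_num_in_range; infer_instance

-- ===== CLAIM (what is proved, stated in full; the proofs are below) =====
def Claim_equal_get_point_num_in_range : Prop := ∀ (count_list : List (List Int)) (curr_range : List Int), Dom_get_point_num_in_range count_list curr_range → Pre_get_point_num_in_range count_list curr_range → Spec_get_point_num_in_range count_list curr_range (get_point_num_in_range count_list curr_range)

-- ===== LEMMAS AND PROOFS =====

-- running prefix sums of the per-row counts, starting from t
def pvPsums (t : Int) : List (List Int) → List Int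
  | [] => []
  | a :: r => (t + PySem.List.pyGetD a 1 0) :: pvPsums (t + PySem.List.pyGetD a 1 0) r

-- the foldl that Source B's append loop performs builds exactly these prefix sums
theorem pref_build (cl : List (List Int)) : ∀ (zs : List Int) (t : Int),
    cl.foldl (fun pref a => pref ++ [PySem.List.pyGetD pref (-1) 0 + PySem.List.pyGetD a 1 0])
      (zs ++ [t]) = zs ++ t :: pvPsums t cl := by
  induction cl with
  | nil => intro zs t; simp [pvPsums]
  | cons a r ih =>
    intro zs t
    simp only [List.foldl_cons, PySem.List.pyGetD_neg_one_append_singleton, pvPsums]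
    rw [ih (zs ++ [t]) (t + PySem.List.pyGetD a 1 0)]
    simp

-- reading entry i of the prefix-sum list is the sum of the first i counts
theorem psums_getD (cl : List (List Int)) : ∀ (t : Int) (i : Nat), i ≤ cl.length →
    (t :: pvPsums t cl).getD i 0
      = t + ((cl.map (fun a => PySem.List.pyGetD a 1 0)).take i).sum := by
  induction cl with
  | nil =>
    intro t i hi
    obtain rfl : i = 0 := Nat.le_zero.mp hi
    simp
  | cons a r ih =>
    intro t i hi
    cases i with
    | zero => simp
    | succ j =>
      simp only [pvPsums, List.getD_cons_succ, List.map_cons, List.take_succ_cons, List.sum_cons]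
      rw [ih (t + PySem.List.pyGetD a 1 0) j (by simpa using hi)]
      ring

-- splitting a prefix sum at an earlier cut
theorem sum_take_split (ys : List Int) (fs fe : Nat) (h : fs ≤ fe) :
    (ys.take fe).sum = (ys.take fs).sum + ((ys.drop fs).take (fe - fs)).sum := by
  have hfe : fe = fs + (fe - fs) := by omega
  rw [hfe, List.take_add]; simp

-- map commutes with Python slicing (slice is clamped drop/take)
theorem map_slice {α β : Type} (g : α → β) (xs : List α) (a? b? : Option Int) :
    (PySem.List.slice xs a? b?).map g = PySem.List.slice (xs.map g) a? b? := by
  simp [PySem.List.slice]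

-- B's seg over the built prefix sums is A's sum over the corresponding slice
theorem seg_eq_slice_sum (cl : List (List Int)) (a b : Int) :
    pvSeg (0 :: pvPsums 0 cl) cl.length a b
      = ((PySem.List.slice cl (some a) (some b)).map (fun x => PySem.List.pyGetD x 1 0)).sum := by
  set ys := cl.map (fun x => PySem.List.pyGetD x 1 0) with hys
  have hn : ys.length = cl.length := by simp [hys]
  have hlo : PySem.List.clampIdx cl.length a ≤ cl.length := by
    simp [PySem.List.clampIdx]; split_ifs <;> omega
  have hhi : PySem.List.clampIdx cl.length b ≤ cl.length := by
    simp [PySem.List.clampIdx]; split_ifs <;> omega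
  rw [map_slice, ← hys]
  simp only [pvSeg, PySem.List.slice, hn]
  rw [psums_getD cl 0 _ hhi, psums_getD cl 0 _ hlo, ← hys]
  by_cases h : PySem.List.clampIdx cl.length a < PySem.List.clampIdx cl.length b
  · rw [if_pos h, sum_take_split ys (PySem.List.clampIdx cl.length a)
      (PySem.List.clampIdx cl.length b) (by omega)]
    ring
  · rw [if_neg h]
    have : PySem.List.clampIdx cl.length b - PySem.List.clampIdx cl.length a = 0 := by omega
    simp [this]

-- ===== VERDICT (by name: the statement is the Claim_ definition above) =====
theorem get_point_num_in_range_spec : Claim_equal_get_point_num_in_range := by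
  intro count_list curr_range _hDom hPre
  obtain ⟨hlen, _hrows⟩ := hPre
  match curr_range, hlen with
  | c0 :: c1 :: rest, _ =>
    have h0 : PySem.List.pyGet? (c0 :: c1 :: rest) 0 = some c0 := by
      simp [PySem.List.pyGet?, PySem.List.pyIdx?, show (0:Int) ≤ ↑rest.length + 1 from by positivity]
    have h1 : PySem.List.pyGet? (c0 :: c1 :: rest) 1 = some c1 := by
      simp [PySem.List.pyGet?, PySem.List.pyIdx?]
    unfold Spec_get_point_num_in_range get_point_num_in_range get_point_num_in_range_alt
    rw [h0, h1]
    dsimp only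
    have hpref := pref_build count_list [] 0
    simp only [List.nil_append] at hpref
    rw [hpref]
    by_cases hlt : c0 < c1
    · rw [if_pos hlt, if_pos hlt, seg_eq_slice_sum, PySem.List.foldl_add]
      simp
    · rw [if_neg hlt, if_neg hlt, seg_eq_slice_sum, seg_eq_slice_sum]
      rw [PySem.List.foldl_add, PySem.List.foldl_add]
      have hfrom : PySem.List.slice count_list (some c0) (some (count_list.length : Int))
          = PySem.List.slice count_list (some c0) none := by
        rw [PySem.List.slice_some_none]
        simp only [PySem.List.slice]
        rw [PySem.List.clampIdx_natCast]
        apply List.take_of_length_le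
        simp only [List.length_drop]
        omega
      rw [hfrom]
      ring
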